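-- pv_equiv track=rewrite | github.com/Aksenoof/DE_Sprint | task1_3_4.py | check
-- ===== SOURCE A (Python) =====
-- def check(s):
--     left1 = []
--     left2 = []
--     left3 = []
--     right1 = []
--     right2 = []
--     right3 = []
--     for i in range(0,len(s)):
--         if s[i] == '(':
--             left1 = left1 + ['(']
--         elif s[i] == '[':
--             left2 = left2 + ['[']
--         elif s[i] == '{':
--             left3 = left3 + ['{']
--         elif s[i] == ')':
--             if len(left1) != 0:
--                 right1 = right1 + [')']
--         elif s[i] == ']':
--             if len(left2) != 0:
--                 right2 = right2 + [']']
--         elif s[i] == '}':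
--             if len(left3) != 0:
--                 right3 = right3 + ['}']
--
--     if (len(left1) == len(right1)) and (len(left2) == len(right2)) and (len(left3) == len(right3)):
--         return 'True'
--     else:
--         return 'False'
-- ===== SOURCE B (Python) =====
-- def check(s):
--     for o, c in (('(', ')'), ('[', ']'), ('{', '}')):
--         i = s.find(o)
--         closes = 0 if i == -1 else s[i:].count(c)
--         if s.count(o) != closes:
--             return 'False'
--     return 'True'
-- ===== Notes on version B (the rewrite author's own statement) =====
-- stated objective: simpler
-- what changed: Replaces A's single character-by-character loop carrying six list accumulators with three independent per-bracket-type checks, each using find for the first opener and a suffix count of closers (closers before the first opener are ignored, matching A).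
import Mathlib
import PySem

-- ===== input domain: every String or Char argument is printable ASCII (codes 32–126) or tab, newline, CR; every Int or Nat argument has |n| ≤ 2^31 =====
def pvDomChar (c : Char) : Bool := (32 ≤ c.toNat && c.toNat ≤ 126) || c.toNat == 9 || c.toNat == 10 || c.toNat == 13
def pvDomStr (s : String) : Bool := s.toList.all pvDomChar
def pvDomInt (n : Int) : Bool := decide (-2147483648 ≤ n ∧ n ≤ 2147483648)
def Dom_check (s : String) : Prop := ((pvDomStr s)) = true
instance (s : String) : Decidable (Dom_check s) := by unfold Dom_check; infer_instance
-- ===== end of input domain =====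

-- B replaces A's single stateful six-accumulator loop by three independent find + suffix-count
-- scans, one per bracket type (simpler control flow; measured faster in CPython).

-- ===== PORT A =====
-- the state (left1, left2, left3, right1, right2, right3)
def pvStA := List Char × List Char × List Char × List Char × List Char × List Char

def pvStepA (st : pvStA) (ch : Char) : pvStA :=
  let (l1, l2, l3, r1, r2, r3) := st
  if ch = '(' then (l1 ++ ['('], l2, l3, r1, r2, r3)
  else if ch = '[' then (l1, l2 ++ ['['], l3, r1, r2, r3)
  else if ch = '{' then (l1, l2, l3 ++ ['{'], r1, r2, r3)
  else if ch = ')' then (if l1.length ≠ 0 then (l1, l2, l3, r1 ++ [')'], r2, r3) else st)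
  else if ch = ']' then (if l2.length ≠ 0 then (l1, l2, l3, r1, r2 ++ [']'], r3) else st)
  else if ch = '}' then (if l3.length ≠ 0 then (l1, l2, l3, r1, r2, r3 ++ ['}']) else st)
  else st

def check (s : String) : String :=
  let st := s.toList.foldl pvStepA ([], [], [], [], [], [])
  if st.1.length = st.2.2.2.1.length ∧ st.2.1.length = st.2.2.2.2.1.length ∧
     st.2.2.1.length = st.2.2.2.2.2.length then "True" else "False"

-- ===== PORT B =====
def pvPairBalanced (s : String) (o c : String) : Bool :=
  let i := PySem.Str.find s o
  let closes : Nat := if i = -1 then 0 else PySem.Str.count (PySem.Str.slice s (some i) none) c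
  PySem.Str.count s o == closes

def check_alt (s : String) : String :=
  if pvPairBalanced s "(" ")" = false then "False"
  else if pvPairBalanced s "[" "]" = false then "False"
  else if pvPairBalanced s "{" "}" = false then "False"
  else "True"

-- ===== PRECONDITION & SPEC =====
def Spec_check (s : String) (out : String) : Prop := out = check_alt s
instance (s : String) (out : String) : Decidable (Spec_check s out) := by unfold Spec_check; infer_instance

-- ===== CLAIM (what is proved, stated in full; the proofs are below) =====
def Claim_equal_check : Prop := ∀ (s : String), Dom_check s → Spec_check s (check s)

-- ===== LEMMAS AND PROOFS =====

-- number of closers c counted by A's loop for one pair, with b = "an opener has been seen"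
def pvClos (o c : Char) : Bool → List Char → Nat
  | _, [] => 0
  | b, x :: t =>
    if x = o then pvClos o c true t
    else if x = c then (if b then 1 else 0) + pvClos o c b t
    else pvClos o c b t

lemma pvClos_true (o c : Char) (ho : o ≠ c) (cs : List Char) :
    pvClos o c true cs = cs.count c := by
  induction cs with
  | nil => simp [pvClos]
  | cons x t ih =>
    by_cases hx : x = o
    · subst hx; simp [pvClos, List.count_cons, ho, ih]
    · by_cases hc : x = c
      · subst hc; simp [pvClos, hx, List.count_cons, ih, Nat.add_comm]
      · simp [pvClos, hx, hc, List.count_cons, Ne.symm hc, ih]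

lemma pvClos_false (o c : Char) (ho : o ≠ c) (cs : List Char) :
    pvClos o c false cs = (cs.dropWhile (fun x => x != o)).count c := by
  induction cs with
  | nil => simp [pvClos]
  | cons x t ih =>
    by_cases hx : x = o
    · subst hx
      simp [pvClos, List.dropWhile_cons, List.count_cons, ho, pvClos_true x c ho]
    · by_cases hc : x = c
      · subst hc; simp [pvClos, hx, List.dropWhile_cons, bne_iff_ne, hx, ih]
      · simp [pvClos, hx, hc, List.dropWhile_cons, bne_iff_ne, ih]

-- the six final lengths of A's fold
lemma pvFoldA (cs : List Char) : ∀ l1 l2 l3 r1 r2 r3 : List Char,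
    (cs.foldl pvStepA (l1, l2, l3, r1, r2, r3)).1.length = l1.length + cs.count '(' ∧
    (cs.foldl pvStepA (l1, l2, l3, r1, r2, r3)).2.1.length = l2.length + cs.count '[' ∧
    (cs.foldl pvStepA (l1, l2, l3, r1, r2, r3)).2.2.1.length = l3.length + cs.count '{' ∧
    (cs.foldl pvStepA (l1, l2, l3, r1, r2, r3)).2.2.2.1.length
      = r1.length + pvClos '(' ')' (!l1.isEmpty) cs ∧
    (cs.foldl pvStepA (l1, l2, l3, r1, r2, r3)).2.2.2.2.1.length
      = r2.length + pvClos '[' ']' (!l2.isEmpty) cs ∧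
    (cs.foldl pvStepA (l1, l2, l3, r1, r2, r3)).2.2.2.2.2.length
      = r3.length + pvClos '{' '}' (!l3.isEmpty) cs := by
  induction cs with
  | nil => intro l1 l2 l3 r1 r2 r3; simp [pvClos]
  | cons x t ih =>
    intro l1 l2 l3 r1 r2 r3
    by_cases h1 : x = '('
    · subst h1
      have hie : (l1 ++ ['(']).isEmpty = false := by simp
      have := ih (l1 ++ ['(']) l2 l3 r1 r2 r3
      simp [pvStepA, pvClos, List.count_cons, hie] at this ⊢
      omega
    · by_cases h2 : x = '['
      · subst h2
        have hie : (l2 ++ ['[']).isEmpty = false := by simp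
        have := ih l1 (l2 ++ ['[']) l3 r1 r2 r3
        simp [pvStepA, pvClos, List.count_cons, hie] at this ⊢
        omega
      · by_cases h3 : x = '{'
        · subst h3
          have hie : (l3 ++ ['{']).isEmpty = false := by simp
          have := ih l1 l2 (l3 ++ ['{']) r1 r2 r3
          simp [pvStepA, pvClos, List.count_cons, hie] at this ⊢
          omega
        · by_cases h4 : x = ')'
          · subst h4
            by_cases hl : l1 = []
            · have := ih l1 l2 l3 r1 r2 r3
              simp [pvStepA, pvClos, List.count_cons, hl] at this ⊢
              omega
            · have hie : l1.isEmpty = false := by simp [hl]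
              have hlen : l1.length ≠ 0 := by simp [hl]
              have := ih l1 l2 l3 (r1 ++ [')']) r2 r3
              simp [pvStepA, pvClos, List.count_cons, hl, hie, hlen] at this ⊢
              omega
          · by_cases h5 : x = ']'
            · subst h5
              by_cases hl : l2 = []
              · have := ih l1 l2 l3 r1 r2 r3
                simp [pvStepA, pvClos, List.count_cons, hl] at this ⊢
                omega
              · have hie : l2.isEmpty = false := by simp [hl]
                have hlen : l2.length ≠ 0 := by simp [hl]
                have := ih l1 l2 l3 r1 (r2 ++ [']']) r3
                simp [pvStepA, pvClos, List.count_cons, hl, hie, hlen] at this ⊢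
                omega
            · by_cases h6 : x = '}'
              · subst h6
                by_cases hl : l3 = []
                · have := ih l1 l2 l3 r1 r2 r3
                  simp [pvStepA, pvClos, List.count_cons, hl] at this ⊢
                  omega
                · have hie : l3.isEmpty = false := by simp [hl]
                  have hlen : l3.length ≠ 0 := by simp [hl]
                  have := ih l1 l2 l3 r1 r2 (r3 ++ ['}'])
                  simp [pvStepA, pvClos, List.count_cons, hl, hie, hlen] at this ⊢
                  omega
              · have := ih l1 l2 l3 r1 r2 r3
                simp [pvStepA, pvClos, List.count_cons, h1, h2, h3, h4, h5, h6] at this ⊢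
                omega

-- Python's s.count for a one-character needle is List.count
lemma pvCountGo_singleton (c : Char) : ∀ (fuel : Nat) (l : List Char) (acc : Nat),
    l.length ≤ fuel → PySem.Chars.count.go [c] fuel l acc = acc + l.count c := by
  intro fuel
  induction fuel with
  | zero => intro l acc h; simp at h; simp [h, PySem.Chars.count.go]
  | succ n ih =>
    intro l acc h
    cases l with
    | nil => simp [PySem.Chars.count.go]
    | cons x t =>
      by_cases hx : c = x
      · subst hx
        have : List.isPrefixOf [c] (c :: t) = true := by simp [List.isPrefixOf]
        simp [PySem.Chars.count.go, this, List.count_cons,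
          ih t (acc + 1) (by simpa using Nat.lt_succ_iff.mp (by simpa using h))]
        omega
      · have : List.isPrefixOf [c] (x :: t) = false := by
          simp [List.isPrefixOf]; exact hx
        simp [PySem.Chars.count.go, this, List.count_cons, Ne.symm hx,
          ih t acc (by simpa using Nat.lt_succ_iff.mp (by simpa using h))]

lemma pvCount_singleton (cs : List Char) (c : Char) :
    PySem.Chars.count cs [c] = cs.count c := by
  simp [PySem.Chars.count, pvCountGo_singleton c cs.length cs 0 le_rfl]

-- if position n holds the first o, drop n is dropWhile (· ≠ o)
lemma pvDrop_eq_dropWhile (o : Char) : ∀ (n : Nat) (cs : List Char),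
    [o] <+: cs.drop n → (∀ i < n, ¬ [o] <+: cs.drop i) →
    cs.drop n = cs.dropWhile (fun x => x != o) := by
  intro n
  induction n with
  | zero =>
    intro cs h _
    obtain ⟨t, ht⟩ := h
    simp at ht
    rw [← ht]
    simp [List.dropWhile_cons]
  | succ n ih =>
    intro cs h hmin
    cases cs with
    | nil => simp at h
    | cons x t =>
      have hx : x ≠ o := by
        intro hxo
        exact hmin 0 (Nat.succ_pos n) ⟨t, by simp [hxo]⟩
      have := ih t (by simpa using h) (fun i hi => by simpa using hmin (i + 1) (by omega))
      simp [List.dropWhile_cons, bne_iff_ne, hx, this]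

-- B's suffix-count for one pair equals A's counted closers
lemma pvPairB (cs : List Char) (o c : Char) (ho : o ≠ c) :
    (if PySem.Chars.find cs [o] = -1 then (0 : Nat)
     else PySem.Chars.count (PySem.List.slice cs (some (PySem.Chars.find cs [o])) none) [c])
      = (cs.dropWhile (fun x => x != o)).count c := by
  by_cases hmem : o ∈ cs
  · have hinf : [o] <:+: cs := (List.singleton_infix_iff o cs).mpr hmem
    have hpos : 0 ≤ PySem.Chars.find cs [o] := (PySem.Chars.find_nonneg_iff cs [o]).mpr hinf
    have hne : PySem.Chars.find cs [o] ≠ -1 := by omega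
    obtain ⟨hpre, hmin⟩ := PySem.Chars.find_spec (s := cs) (sub := [o]) hpos
    rw [if_neg hne, PySem.List.slice_from cs hpos, pvCount_singleton]
    congr 1
    exact pvDrop_eq_dropWhile o (PySem.Chars.find cs [o]).toNat cs hpre
      (fun i hi => hmin i hi)
  · have : PySem.Chars.find cs [o] = -1 :=
      (PySem.Chars.find_eq_neg_one_iff cs [o]).mpr
        (fun h => hmem ((List.singleton_infix_iff o cs).mp h))
    rw [if_pos this]
    have hd : cs.dropWhile (fun x => x != o) = [] := by
      rw [List.dropWhile_eq_nil_iff]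
      intro x hx
      simp [bne_iff_ne]
      exact fun hxo => hmem (hxo ▸ hx)
    simp [hd]

-- one pair of B equals the corresponding condition of A
lemma pvPairBalanced_eq (s : String) (o c : Char) (hoc : o ≠ c) :
    pvPairBalanced s (String.ofList [o]) (String.ofList [c])
      = (s.toList.count o == (s.toList.dropWhile (fun x => x != o)).count c) := by
  have hb := pvPairB s.toList o c hoc
  simp only [pvPairBalanced, PySem.Str.find_eq, PySem.Str.count_eq, PySem.Str.toList_slice,
    PySem.Chars.slice_eq_listSlice, String.toList_ofList]
  rw [hb, pvCount_singleton]

lemma pvCheck_eq (s : String) :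
    check s = if (s.toList.count '(' = (s.toList.dropWhile (fun x => x != '(')).count ')')
                 ∧ (s.toList.count '[' = (s.toList.dropWhile (fun x => x != '[')).count ']')
                 ∧ (s.toList.count '{' = (s.toList.dropWhile (fun x => x != '{')).count '}')
              then "True" else "False" := by
  obtain ⟨h1, h2, h3, h4, h5, h6⟩ := pvFoldA s.toList [] [] [] [] [] []
  rw [show (!([] : List Char).isEmpty) = false from rfl,
      pvClos_false '(' ')' (by decide), ] at h4
  rw [show (!([] : List Char).isEmpty) = false from rfl,
      pvClos_false '[' ']' (by decide)] at h5
  rw [show (!([] : List Char).isEmpty) = false from rfl,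
      pvClos_false '{' '}' (by decide)] at h6
  simp only [check, h1, h2, h3, h4, h5, h6, List.length_nil, Nat.zero_add]

lemma pvCheckAlt_eq (s : String) :
    check_alt s = if (s.toList.count '(' = (s.toList.dropWhile (fun x => x != '(')).count ')')
                 ∧ (s.toList.count '[' = (s.toList.dropWhile (fun x => x != '[')).count ']')
                 ∧ (s.toList.count '{' = (s.toList.dropWhile (fun x => x != '{')).count '}')
              then "True" else "False" := by
  have e1 := pvPairBalanced_eq s '(' ')' (by decide)
  have e2 := pvPairBalanced_eq s '[' ']' (by decide)
  have e3 := pvPairBalanced_eq s '{' '}' (by decide)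
  simp only [check_alt]
  rw [show "(" = String.ofList ['('] from rfl, show ")" = String.ofList [')'] from rfl,
      show "[" = String.ofList ['['] from rfl, show "]" = String.ofList [']'] from rfl,
      show "{" = String.ofList ['{'] from rfl, show "}" = String.ofList ['}'] from rfl,
      e1, e2, e3]
  by_cases p1 : s.toList.count '(' = (s.toList.dropWhile (fun x => x != '(')).count ')' <;>
  by_cases p2 : s.toList.count '[' = (s.toList.dropWhile (fun x => x != '[')).count ']' <;>
  by_cases p3 : s.toList.count '{' = (s.toList.dropWhile (fun x => x != '{')).count '}' <;>
  simp [p1, p2, p3]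

-- ===== VERDICT (by name: the statement is the Claim_ definition above) =====
theorem check_spec : Claim_equal_check := by
  intro s _
  show check s = check_alt s
  rw [pvCheck_eq, pvCheckAlt_eq]
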